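-- pv_equiv track=rewrite | github.com/msal98/new-beer-toppers | new-beer-toppers.py | stringify_records
-- ===== SOURCE A (Python) =====
-- def stringify_records(records):
--     if not records:
--         response = "I'm sorry, I couldn't get any top beer information"
--     elif len(records) == 1:
--         response = str(records[0])
--     else:
--         response = ', '.join(str(record) for record in records[:-1])
--         response += ', and ' + str(records[-1])
--
--     return response
-- ===== SOURCE B (Python) =====
-- def stringify_records(records):
--     if not records:
--         return "I'm sorry, I couldn't get any top beer information"
--     result = str(records[0])
--     last = len(records) - 1
--     for i, rec in enumerate(records[1:], 1):
--         result += (', and ' if i == last else ', ') + str(rec)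
--     return result
-- ===== Notes on version B (the rewrite author's own statement) =====
-- stated objective: alternative
-- what changed: Replaces the slice-join-then-append-last construction with a single incremental left-to-right pass that picks the separator (', ' vs ', and ') by position, subsuming the len==1 branch.
import Mathlib
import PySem

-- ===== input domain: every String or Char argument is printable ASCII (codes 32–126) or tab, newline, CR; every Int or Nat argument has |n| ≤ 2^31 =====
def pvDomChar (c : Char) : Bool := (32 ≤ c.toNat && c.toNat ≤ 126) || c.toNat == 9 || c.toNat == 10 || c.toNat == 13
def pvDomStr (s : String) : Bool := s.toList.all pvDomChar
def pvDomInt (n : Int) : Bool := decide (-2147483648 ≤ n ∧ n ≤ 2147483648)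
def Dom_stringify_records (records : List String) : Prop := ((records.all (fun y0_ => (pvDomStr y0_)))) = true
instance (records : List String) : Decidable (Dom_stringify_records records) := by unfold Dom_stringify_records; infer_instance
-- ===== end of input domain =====

-- B replaces A's slice-join-then-append-last construction with a single incremental pass
-- choosing the separator (', ' vs ', and ') by position (objective: alternative decomposition).

-- ===== PORT A =====
-- literal port of A: guard for [], single-element branch, else ', '.join(records[:-1]) + ', and ' + str(records[-1]).
-- records[0] / records[-1] are reached only on nonempty lists, so .getD "" never supplies the default.
def stringify_records (records : List String) : String :=
  if records = [] then "I'm sorry, I couldn't get any top beer information"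
  else if records.length = 1 then (PySem.List.pyGet? records 0).getD ""
  else
    String.ofList ((PySem.Str.join ", " (PySem.List.slice records none (some (-1)))).toList
      ++ (", and ".toList ++ ((PySem.List.pyGet? records (-1)).getD "").toList))

-- ===== PORT B =====
-- literal port of Source B: result = records[0], then one pass over enumerate(records[1:], 1)
-- appending (', and ' if i == last else ', ') + rec.
def stringify_records_alt (records : List String) : String :=
  if records = [] then "I'm sorry, I couldn't get any top beer information"
  else
    let last : Int := (records.length : Int) - 1
    String.ofList ((PySem.List.enumerate (PySem.List.slice records (some 1) none) 1).foldl
      (fun acc p => acc ++ ((if p.1 = last then ", and ".toList else ", ".toList) ++ p.2.toList))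
      ((PySem.List.pyGet? records 0).getD "").toList)

-- ===== PRECONDITION & SPEC =====
def Spec_stringify_records (records : List String) (out : String) : Prop := out = stringify_records_alt records
instance (records : List String) (out : String) : Decidable (Spec_stringify_records records out) := by unfold Spec_stringify_records; infer_instance

-- ===== CLAIM (what is proved, stated in full; the proofs are below) =====
def Claim_equal_stringify_records : Prop := ∀ (records : List String), Dom_stringify_records records → Spec_stringify_records records (stringify_records records)

-- ===== LEMMAS AND PROOFS =====

lemma join_shift (sep a b : List Char) (l : List (List Char)) :
    PySem.Chars.join sep ((a ++ sep ++ b) :: l) = a ++ (sep ++ PySem.Chars.join sep (b :: l)) := by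
  cases l with
  | nil => simp [PySem.Chars.join_singleton]
  | cons q l => simp [PySem.Chars.join_cons_cons]

lemma slice_neg_one_eq_dropLast (xs : List String) :
    PySem.List.slice xs none (some (-1)) = xs.dropLast := by
  simp only [List.dropLast_eq_take]
  simp [PySem.List.slice, PySem.List.clampIdx]
  split_ifs with h
  · simp [h]
  · omega

lemma pyGet_neg_one_eq_getLast (r : String) (xs : List String) :
    (PySem.List.pyGet? (r :: xs) (-1)).getD "" = (r :: xs).getLast (by simp) := by
  simp [PySem.List.pyGet?, PySem.List.pyIdx?, List.getLast_eq_getElem]; rfl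

lemma fold_enum_eq (rest : List String) (hne : rest ≠ []) :
    ∀ (s last : Int) (init : List Char), last = s + rest.length - 1 →
    (PySem.List.enumerate rest s).foldl
        (fun acc p => acc ++ ((if p.1 = last then ", and ".toList else ", ".toList) ++ p.2.toList)) init
      = PySem.Chars.join ", ".toList (init :: rest.dropLast.map String.toList)
          ++ (", and ".toList ++ (rest.getLast hne).toList) := by
  induction rest with
  | nil => exact absurd rfl hne
  | cons x tail ih =>
    intro s last init hlast
    cases tail with
    | nil =>
      have hs : last = s := by simpa using hlast
      simp [PySem.List.enumerate_cons, PySem.List.enumerate_nil, hs,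
            PySem.Chars.join_singleton]
    | cons y tail' =>
      have hne' : (y :: tail') ≠ [] := by simp
      have hcond : s ≠ last := by
        simp only [List.length_cons] at hlast; omega
      have hlast' : last = (s + 1) + (y :: tail').length - 1 := by
        simp only [List.length_cons] at hlast ⊢; omega
      rw [PySem.List.enumerate_cons]
      simp only [List.foldl_cons]
      rw [if_neg hcond]
      rw [ih hne' (s + 1) last (init ++ (", ".toList ++ x.toList)) hlast']
      have : init ++ (", ".toList ++ x.toList) = init ++ ", ".toList ++ x.toList := by
        simp
      rw [this]
      rw [List.dropLast_cons_of_ne_nil hne', List.map_cons, join_shift]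
      rw [List.getLast_cons hne']
      simp [PySem.Chars.join_cons_cons]

-- ===== VERDICT (by name: the statement is the Claim_ definition above) =====
theorem stringify_records_spec : Claim_equal_stringify_records := by
  intro records _
  unfold Spec_stringify_records stringify_records stringify_records_alt
  cases records with
  | nil => simp
  | cons r rest =>
    cases rest with
    | nil =>
      simp [PySem.List.enumerate_nil, PySem.List.pyGet?, PySem.List.pyIdx?,
            PySem.List.slice_from (xs := [r]) (a := 1) (by norm_num)]
    | cons x rest' =>
      have hne : (x :: rest') ≠ [] := by simp
      have hlen : (r :: x :: rest').length ≠ 1 := by simp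
      rw [if_neg (by simp), if_neg hlen, if_neg (by simp)]
      rw [PySem.List.slice_from (xs := r :: x :: rest') (a := 1) (by norm_num)]
      simp only [Int.toNat_one, List.drop_succ_cons, List.drop_zero]
      rw [fold_enum_eq (x :: rest') hne 1 (((r :: x :: rest').length : Int) - 1)
            ((PySem.List.pyGet? (r :: x :: rest') 0).getD "").toList
            (by simp only [List.length_cons]; push_cast; ring)]
      rw [PySem.Str.toList_join, slice_neg_one_eq_dropLast,
          pyGet_neg_one_eq_getLast r (x :: rest')]
      rw [List.dropLast_cons_of_ne_nil hne, List.map_cons]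
      have h0 : (PySem.List.pyGet? (r :: x :: rest') 0).getD "" = r := by
        have : ((0:Int) ≤ ↑rest'.length + 1) := by positivity
        simp [PySem.List.pyGet?, PySem.List.pyIdx?, this]
      rw [h0, List.getLast_cons hne]
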